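-- pv_equiv track=rewrite | github.com/derenlei/CSGO_Econ_AI | src/utils.py | split_by_type
-- ===== SOURCE A (Python) =====
-- def split_by_type(a, action_type):
--     ret = [[], [], []]
--     for action in a:
--         if action_type[action] == 0: # pistols
--             ret[0].append(action)
--         elif 1 <= action_type[action] <= 5: # primary guns
--             ret[0].append(action)
--         elif action_type[action] == 6: # grenades
--             ret[1].append(action)
--         else: # equipment
--             ret[2].append(action)
--     return ret
-- ===== SOURCE B (Python) =====
-- def split_by_type(a, action_type):
--     return [
--         [x for x in a if 0 <= action_type[x] <= 5],
--         [x for x in a if action_type[x] == 6],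
--         [x for x in a if action_type[x] < 0 or action_type[x] > 6],
--     ]
-- ===== Notes on version B (the rewrite author's own statement) =====
-- stated objective: idiomatic
-- what changed: Replaced the single pass with a mutable three-bucket accumulator and an if/elif cascade by three independent filtering comprehensions, one per bucket (merging the ==0 and 1..5 branches into one 0..5 condition).
import Mathlib
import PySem

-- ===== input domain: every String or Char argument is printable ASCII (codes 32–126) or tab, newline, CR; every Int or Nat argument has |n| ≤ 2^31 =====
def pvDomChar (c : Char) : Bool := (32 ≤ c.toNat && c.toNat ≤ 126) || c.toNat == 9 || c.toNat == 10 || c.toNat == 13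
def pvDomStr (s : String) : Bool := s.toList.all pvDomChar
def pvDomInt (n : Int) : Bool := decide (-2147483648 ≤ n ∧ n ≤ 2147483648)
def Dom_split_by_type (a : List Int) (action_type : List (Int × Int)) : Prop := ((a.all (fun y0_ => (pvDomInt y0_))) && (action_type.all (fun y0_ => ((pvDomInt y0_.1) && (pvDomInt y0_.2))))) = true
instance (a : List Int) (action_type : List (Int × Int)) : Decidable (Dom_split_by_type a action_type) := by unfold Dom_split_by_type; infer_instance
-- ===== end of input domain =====

-- B replaces A's single pass with a mutable three-bucket accumulator and an if/elif cascade
-- by three independent filtering passes, one per bucket (objective: idiomatic).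

-- dict[int,int] lookup action_type[x]; Pre_ guarantees the key is present (KeyError excluded)
def pvAT (action_type : List (Int × Int)) (x : Int) : Int :=
  ((PySem.Dict.mk action_type).get? x).getD 0

-- ===== PORT A =====
def split_by_type (a : List Int) (action_type : List (Int × Int)) : List (List Int) :=
  let ret := a.foldl (fun (r : List Int × List Int × List Int) action =>
    if pvAT action_type action = 0 then (r.1 ++ [action], r.2.1, r.2.2)
    else if 1 ≤ pvAT action_type action ∧ pvAT action_type action ≤ 5 then
      (r.1 ++ [action], r.2.1, r.2.2)
    else if pvAT action_type action = 6 then (r.1, r.2.1 ++ [action], r.2.2)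
    else (r.1, r.2.1, r.2.2 ++ [action])) ([], [], [])
  [ret.1, ret.2.1, ret.2.2]

-- ===== PORT B =====
def split_by_type_alt (a : List Int) (action_type : List (Int × Int)) : List (List Int) :=
  [ a.filter (fun x => 0 ≤ pvAT action_type x ∧ pvAT action_type x ≤ 5),
    a.filter (fun x => pvAT action_type x = 6),
    a.filter (fun x => pvAT action_type x < 0 ∨ pvAT action_type x > 6) ]

-- ===== PRECONDITION & SPEC =====
-- Pre_: every element of a is a key of the dict action_type (otherwise Python's
-- action_type[action] raises KeyError, so A returns nothing there).
def Pre_split_by_type (a : List Int) (action_type : List (Int × Int)) : Prop :=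
  a.all (fun x => ((PySem.Dict.mk action_type).get? x).isSome) = true
instance (a : List Int) (action_type : List (Int × Int)) : Decidable (Pre_split_by_type a action_type) := by unfold Pre_split_by_type; infer_instance

def pvWitness_split_by_type : List Int × (List (Int × Int)) :=
  ([0, 1, 2, 1], [(0, 0), (1, 6), (2, 9)])

def Spec_split_by_type (a : List Int) (action_type : List (Int × Int)) (out : List (List Int)) : Prop := out = split_by_type_alt a action_type
instance (a : List Int) (action_type : List (Int × Int)) (out : List (List Int)) : Decidable (Spec_split_by_type a action_type out) := by unfold Spec_split_by_type; infer_instance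

-- ===== CLAIM (what is proved, stated in full; the proofs are below) =====
def Claim_equal_split_by_type : Prop := ∀ (a : List Int) (action_type : List (Int × Int)), Dom_split_by_type a action_type → Pre_split_by_type a action_type → Spec_split_by_type a action_type (split_by_type a action_type)

-- ===== LEMMAS AND PROOFS =====

-- loop invariant: A's fold starting from (r0, r1, r2) appends exactly B's three filters
theorem split_fold_inv (action_type : List (Int × Int)) (a : List Int)
    (r0 r1 r2 : List Int) :
    a.foldl (fun (r : List Int × List Int × List Int) action =>
      if pvAT action_type action = 0 then (r.1 ++ [action], r.2.1, r.2.2)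
      else if 1 ≤ pvAT action_type action ∧ pvAT action_type action ≤ 5 then
        (r.1 ++ [action], r.2.1, r.2.2)
      else if pvAT action_type action = 6 then (r.1, r.2.1 ++ [action], r.2.2)
      else (r.1, r.2.1, r.2.2 ++ [action])) (r0, r1, r2)
    = (r0 ++ a.filter (fun x => 0 ≤ pvAT action_type x ∧ pvAT action_type x ≤ 5),
       r1 ++ a.filter (fun x => pvAT action_type x = 6),
       r2 ++ a.filter (fun x => pvAT action_type x < 0 ∨ pvAT action_type x > 6)) := by
  induction a generalizing r0 r1 r2 with
  | nil => simp
  | cons x xs ih =>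
    simp only [List.foldl_cons, List.filter_cons]
    rcases lt_trichotomy (pvAT action_type x) 0 with h | h | h
    · rw [if_neg (by omega), if_neg (by omega), if_neg (by omega), ih]
      simp only [decide_eq_true_eq]
      rw [if_neg (by omega), if_neg (by omega), if_pos (by omega)]
      simp
    · rw [if_pos h, ih]
      simp only [decide_eq_true_eq]
      rw [if_pos (by omega), if_neg (by omega), if_neg (by omega)]
      simp
    · by_cases h5 : pvAT action_type x ≤ 5
      · rw [if_neg (by omega), if_pos (by omega), ih]
        simp only [decide_eq_true_eq]
        rw [if_pos (by omega), if_neg (by omega), if_neg (by omega)]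
        simp
      · by_cases h6 : pvAT action_type x = 6
        · rw [if_neg (by omega), if_neg (by omega), if_pos h6, ih]
          simp only [decide_eq_true_eq]
          rw [if_neg (by omega), if_pos h6, if_neg (by omega)]
          simp
        · rw [if_neg (by omega), if_neg (by omega), if_neg h6, ih]
          simp only [decide_eq_true_eq]
          rw [if_neg (by omega), if_neg (by omega), if_pos (by omega)]
          simp

-- ===== VERDICT (by name: the statement is the Claim_ definition above) =====
theorem split_by_type_spec : Claim_equal_split_by_type := by
  intro a action_type _ _
  show split_by_type a action_type = split_by_type_alt a action_type
  unfold split_by_type split_by_type_alt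
  rw [split_fold_inv]
  simp
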